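-- pv_equiv track=rewrite | github.com/discobot/wiki_crawl | index.py | to_delta
-- ===== SOURCE A (Python) =====
-- def to_delta(seq):
--     prev = 0
--     for i in range(len(seq)):
--         if i == 0:
--             yield seq[i]
--             prev = seq[i]
--         else:
--             yield seq[i] - prev
--             prev = seq[i]
-- ===== SOURCE B (Python) =====
-- def to_delta(seq):
--     # Build the output back-to-front: walk from the last index down,
--     # collecting seq[i] - seq[i-1], finish with the head, then replay reversed.
--     out = []
--     i = len(seq) - 1
--     while i > 0:
--         out.append(seq[i] - seq[i - 1])
--         i -= 1
--     if len(seq) > 0: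
--         out.append(seq[0])
--     yield from reversed(out)
-- ===== Notes on version B (the rewrite author's own statement) =====
-- stated objective: alternative
-- what changed: Builds the result back-to-front: a descending while-loop from the last index collects seq[i]-seq[i-1] into a buffer (no running prev accumulator, no i==0 branch), the head is appended last, and the reversed buffer is yielded.
import Mathlib
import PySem

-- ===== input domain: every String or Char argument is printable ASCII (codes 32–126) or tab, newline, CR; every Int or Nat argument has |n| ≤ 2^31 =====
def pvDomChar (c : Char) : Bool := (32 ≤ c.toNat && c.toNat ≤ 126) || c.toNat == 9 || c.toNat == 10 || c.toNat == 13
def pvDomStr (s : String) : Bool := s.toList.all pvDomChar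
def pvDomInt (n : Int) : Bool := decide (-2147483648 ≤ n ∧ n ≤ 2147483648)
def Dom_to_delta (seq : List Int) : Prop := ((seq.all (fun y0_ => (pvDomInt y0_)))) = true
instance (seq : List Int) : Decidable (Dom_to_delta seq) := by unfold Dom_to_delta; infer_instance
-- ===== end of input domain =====

-- B builds the output back-to-front (descending index loop, head appended last, buffer reversed)
-- instead of A's forward index loop with an i==0 branch and a running prev accumulator
-- (alternative decomposition; both are generators, compared as the list of yielded values).

-- ===== PORT A =====
-- loop body of A; seq[i] is always in range here, so pyGetD with default 0 is exact
def to_delta_stepA (seq : List Int) : (List Int × Int) → Int → (List Int × Int) :=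
  fun s i =>
    if i == 0 then (s.1 ++ [PySem.List.pyGetD seq i 0], PySem.List.pyGetD seq i 0)
    else (s.1 ++ [PySem.List.pyGetD seq i 0 - s.2], PySem.List.pyGetD seq i 0)

def to_delta (seq : List Int) : List Int :=
  ((PySem.List.pyRange 0 (seq.length : Int) 1).foldl (to_delta_stepA seq) ([], 0)).1

-- ===== PORT B =====
-- the descending while-loop of Source B: fuel = the current index i (while i > 0)
def to_delta_altLoop (seq : List Int) : Nat → List Int → List Int
  | 0, out => out
  | Nat.succ j, out =>
      to_delta_altLoop seq j
        (out ++ [PySem.List.pyGetD seq ((j + 1 : Nat) : Int) 0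
                  - PySem.List.pyGetD seq ((j : Nat) : Int) 0])

def to_delta_alt (seq : List Int) : List Int :=
  let out := to_delta_altLoop seq (seq.length - 1) []
  let out2 := if seq.length > 0 then out ++ [PySem.List.pyGetD seq 0 0] else out
  out2.reverse

-- ===== PRECONDITION & SPEC =====
def Spec_to_delta (seq : List Int) (out : List Int) : Prop := out = to_delta_alt seq
instance (seq : List Int) (out : List Int) : Decidable (Spec_to_delta seq out) := by unfold Spec_to_delta; infer_instance

-- ===== CLAIM (what is proved, stated in full; the proofs are below) =====
def Claim_equal_to_delta : Prop := ∀ (seq : List Int), Dom_to_delta seq → Spec_to_delta seq (to_delta seq)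

-- ===== LEMMAS AND PROOFS =====

-- canonical description of the result: head, then pairwise deltas
def pvCanon (seq : List Int) : List Int :=
  match seq with
  | [] => []
  | h :: t => h :: (seq.zip t).map (fun p => p.2 - p.1)

-- ----- A-side: the loop from index pre.length ≥ 1 onward appends the pairwise deltas of prev :: t
lemma to_delta_tailloop (t : List Int) : ∀ (pre acc : List Int) (prev : Int), 1 ≤ pre.length →
    ((PySem.List.pyRange (pre.length : Int) ((pre ++ t).length : Int) 1).foldl
        (to_delta_stepA (pre ++ t)) (acc, prev)).1
      = acc ++ ((prev :: t).zip t).map (fun p => p.2 - p.1) := by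
  induction t with
  | nil =>
    intro pre acc prev _
    simp [PySem.List.pyRange_one_eq_nil]
  | cons x t' ih =>
    intro pre acc prev hpre
    rw [PySem.List.pyRange_one_cons (by simp)]
    have hne : ((pre.length : Int) == 0) = false := by
      rw [beq_eq_false_iff_ne]; omega
    have hget : PySem.List.pyGetD (pre ++ x :: t') (pre.length : Int) 0 = x := by
      simp [PySem.List.pyGetD_natCast, List.getD_eq_getElem?_getD]
    simp only [List.foldl_cons, to_delta_stepA, hne, Bool.false_eq_true, if_false, hget]
    have hrw : pre ++ x :: t' = (pre ++ [x]) ++ t' := by simp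
    have hlen : (pre.length : Int) + 1 = ((pre ++ [x]).length : Int) := by simp
    have hle : 1 ≤ (pre ++ [x]).length := by simp
    rw [hrw, hlen, ih (pre ++ [x]) (acc ++ [x - prev]) x hle]
    simp

lemma to_delta_eq_canon (seq : List Int) : to_delta seq = pvCanon seq := by
  cases seq with
  | nil => simp [to_delta, pvCanon, PySem.List.pyRange_one_eq_nil]
  | cons h t =>
    unfold to_delta
    rw [PySem.List.pyRange_one_cons (by simp)]
    have hget : PySem.List.pyGetD (h :: t) (0 : Int) 0 = h := by
      simp [PySem.List.pyGetD_zero_cons]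
    simp only [List.foldl_cons, to_delta_stepA, beq_self_eq_true, if_true, hget]
    have hle1 : 1 ≤ ([h] : List Int).length := by simp
    rw [show ((0 : Int) + 1) = (([h] : List Int).length : Int) by simp,
        show (h :: t) = [h] ++ t from rfl,
        to_delta_tailloop t [h] ([] ++ [h]) h hle1]
    simp [pvCanon]

-- ----- B-side
-- descending deltas collected by the loop, last index i first
def pvDD (l : List Int) : Nat → List Int
  | 0 => []
  | i + 1 => (l.getD (i + 1) 0 - l.getD i 0) :: pvDD l i

lemma altLoop_eq (l : List Int) : ∀ (i : Nat) (out : List Int),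
    to_delta_altLoop l i out = out ++ pvDD l i := by
  intro i
  induction i with
  | zero => intro out; simp [to_delta_altLoop, pvDD]
  | succ j ih =>
    intro out
    have hg1 : PySem.List.pyGetD l ((j + 1 : Nat) : Int) 0 = l.getD (j + 1) 0 :=
      PySem.List.pyGetD_natCast l (j + 1) 0
    have hg0 : PySem.List.pyGetD l ((j : Nat) : Int) 0 = l.getD j 0 :=
      PySem.List.pyGetD_natCast l j 0
    rw [to_delta_altLoop, hg1, hg0, ih]
    simp [pvDD]

lemma pvDD_reverse (l : List Int) : ∀ i : Nat,
    (pvDD l i).reverse = (List.range i).map (fun j => l.getD (j + 1) 0 - l.getD j 0) := by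
  intro i
  induction i with
  | zero => simp [pvDD]
  | succ j ih => simp [pvDD, ih, List.range_succ]

lemma range_map_eq_zip (h : Int) (t : List Int) :
    (List.range t.length).map (fun j => (h :: t).getD (j + 1) 0 - (h :: t).getD j 0)
      = ((h :: t).zip t).map (fun p => p.2 - p.1) := by
  apply List.ext_getElem
  · simp
  · intro j h1 h2
    have hj : j < t.length := by simpa using h1
    simp only [List.getElem_map, List.getElem_range, List.getElem_zip]
    rw [List.getD_eq_getElem _ _ (by simpa using Nat.succ_lt_succ hj),
        List.getD_eq_getElem _ _ (by simp; omega)]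
    simp

lemma to_delta_alt_eq_canon (seq : List Int) : to_delta_alt seq = pvCanon seq := by
  cases seq with
  | nil => simp [to_delta_alt, to_delta_altLoop, pvCanon]
  | cons h t =>
    have hget : PySem.List.pyGetD (h :: t) 0 0 = h := by
      simp [PySem.List.pyGetD_zero_cons]
    simp only [to_delta_alt]
    rw [if_pos (by simp), altLoop_eq, hget]
    rw [show (h :: t).length - 1 = t.length from by simp]
    rw [List.nil_append, List.reverse_append, pvDD_reverse, range_map_eq_zip]
    simp [pvCanon]

-- ===== VERDICT (by name: the statement is the Claim_ definition above) =====
theorem to_delta_spec : Claim_equal_to_delta := by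
  intro seq _
  unfold Spec_to_delta
  rw [to_delta_eq_canon, to_delta_alt_eq_canon]
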